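-- pv_equiv track=rewrite | github.com/gzw-creator/passwordAnalysis | GuessPassword/main.py | identify_small_pattern
-- ===== SOURCE A (Python) =====
-- def identify_small_pattern(pwd_struction):
--     """
--     将口令结构划分为一个个的小模块，即将"L1D1S1"划分为"L1"、"D1"、"S1"
--     :param pwd_struction: 口令结构
--     :return:
--     """
--     indexes = []
--     patterns = []
--     for index, s in enumerate(pwd_struction):
--         if s in ['L', 'S', 'D']:
--             indexes.append(index)
--     for i in range(len(indexes)):
--         if i < len(indexes)-1:
--             patterns.append(pwd_struction[indexes[i]:indexes[i + 1]])
--         else: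
--             patterns.append(pwd_struction[indexes[i]:])
--     return patterns
-- ===== SOURCE B (Python) =====
-- def identify_small_pattern(pwd_struction):
--     """Single-pass state machine: flush the current chunk whenever a marker
--     ('L', 'S', 'D') starts a new one; characters before the first marker are
--     not part of any chunk."""
--     patterns = []
--     current = None
--     for ch in pwd_struction:
--         if ch in "LSD":
--             if current is not None:
--                 patterns.append(current)
--             current = ch
--         elif current is not None:
--             current += ch
--     if current is not None:
--         patterns.append(current)
--     return patterns
-- ===== Notes on version B (the rewrite author's own statement) =====
-- stated objective: alternative
-- what changed: Replaced A's two-pass design (collect all marker indexes, then slice the string between consecutive indexes) by a one-pass state machine that accumulates the current chunk and flushes it at each marker.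
import Mathlib
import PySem

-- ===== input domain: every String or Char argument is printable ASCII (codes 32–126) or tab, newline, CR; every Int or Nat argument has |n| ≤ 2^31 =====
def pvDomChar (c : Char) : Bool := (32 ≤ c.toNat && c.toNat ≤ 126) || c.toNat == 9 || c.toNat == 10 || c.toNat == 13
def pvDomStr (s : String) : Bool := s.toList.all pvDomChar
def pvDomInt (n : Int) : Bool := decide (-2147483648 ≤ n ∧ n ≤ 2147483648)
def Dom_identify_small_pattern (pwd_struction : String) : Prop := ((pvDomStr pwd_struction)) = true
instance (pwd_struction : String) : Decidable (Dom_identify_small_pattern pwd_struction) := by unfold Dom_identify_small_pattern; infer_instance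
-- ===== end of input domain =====

-- B replaces A's two passes (collect marker indexes, then slice between consecutive indexes)
-- by a one-pass state machine flushing the current chunk at each marker; same return value.

-- ===== PORT A =====
-- literal port of A: first loop collects the indexes of 'L'/'S'/'D', second loop slices
def identify_small_pattern (pwd_struction : String) : List String :=
  let cs := pwd_struction.toList
  let indexes : List Int :=
    (PySem.List.enumerate cs 0).foldl
      (fun acc p => if p.2 ∈ (['L', 'S', 'D'] : List Char) then acc ++ [p.1] else acc) []
  let patterns : List String :=
    (PySem.List.pyRange 0 (indexes.length : Int) 1).foldl
      (fun pats i =>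
        if i < (indexes.length : Int) - 1 then
          pats ++ [String.ofList (PySem.List.slice cs
            (some (PySem.List.pyGetD indexes i 0)) (some (PySem.List.pyGetD indexes (i + 1) 0)))]
        else
          pats ++ [String.ofList (PySem.List.slice cs
            (some (PySem.List.pyGetD indexes i 0)) none)]) []
  patterns

-- ===== PORT B =====
-- literal port of B: fold carrying (finished patterns, optional current chunk), final flush
def identify_small_pattern_alt (pwd_struction : String) : List String :=
  let fin :=
    pwd_struction.toList.foldl
      (fun (st : List String × Option (List Char)) ch =>
        if ch = 'L' ∨ ch = 'S' ∨ ch = 'D' then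
          (match st.2 with
           | none => st.1
           | some cur => st.1 ++ [String.ofList cur], some [ch])
        else
          match st.2 with
          | none => st
          | some cur => (st.1, some (cur ++ [ch])))
      ([], none)
  match fin.2 with
  | none => fin.1
  | some cur => fin.1 ++ [String.ofList cur]

-- ===== PRECONDITION & SPEC =====
def Spec_identify_small_pattern (pwd_struction : String) (out : List String) : Prop := out = identify_small_pattern_alt pwd_struction
instance (pwd_struction : String) (out : List String) : Decidable (Spec_identify_small_pattern pwd_struction out) := by unfold Spec_identify_small_pattern; infer_instance

-- ===== CLAIM (what is proved, stated in full; the proofs are below) =====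
def Claim_equal_identify_small_pattern : Prop := ∀ (pwd_struction : String), Dom_identify_small_pattern pwd_struction → Spec_identify_small_pattern pwd_struction (identify_small_pattern pwd_struction)

-- ===== LEMMAS AND PROOFS =====

-- positions (from the front) of the marker characters
def markerIdx : List Char → List Nat
  | [] => []
  | c :: cs =>
    if c = 'L' ∨ c = 'S' ∨ c = 'D' then 0 :: (markerIdx cs).map (· + 1)
    else (markerIdx cs).map (· + 1)

-- the chunks A's second loop produces, driven by the list of marker positions
def sliceChunks (cs : List Char) : List Nat → List String
  | [] => []
  | [i] => [String.ofList (cs.drop i)]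
  | i :: j :: rest => String.ofList ((cs.drop i).take (j - i)) :: sliceChunks cs (j :: rest)

-- the chunks B produces while a current chunk `cur` is open
def segsIn (cur : List Char) : List Char → List String
  | [] => [String.ofList cur]
  | c :: cs =>
    if c = 'L' ∨ c = 'S' ∨ c = 'D' then String.ofList cur :: segsIn [c] cs
    else segsIn (cur ++ [c]) cs

-- the chunks B produces before any marker has been seen
def segs : List Char → List String
  | [] => []
  | c :: cs => if c = 'L' ∨ c = 'S' ∨ c = 'D' then segsIn [c] cs else segs cs

lemma idxFold (cs : List Char) : ∀ (acc : List Int) (s : Int),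
    (PySem.List.enumerate cs s).foldl
      (fun acc p => if p.2 ∈ (['L', 'S', 'D'] : List Char) then acc ++ [p.1] else acc) acc
    = acc ++ (markerIdx cs).map (fun (k : Nat) => s + (k : Int)) := by
  induction cs with
  | nil =>
    intro acc s
    rw [PySem.List.enumerate_nil]
    simp [markerIdx]
  | cons c cs ih =>
    intro acc s
    rw [PySem.List.enumerate_cons]
    simp only [List.foldl_cons, markerIdx]
    by_cases h : c = 'L' ∨ c = 'S' ∨ c = 'D'
    · have hm : c ∈ (['L', 'S', 'D'] : List Char) := by
        rcases h with h | h | h <;> simp [h]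
      rw [if_pos hm, ih, if_pos h]
      simp only [List.map_cons, List.map_map, List.append_assoc, List.singleton_append,
        Nat.cast_zero, add_zero]
      congr 2
      apply List.map_congr_left
      intro k _
      simp only [Function.comp_apply]
      push_cast
      ring
    · have hm : c ∉ (['L', 'S', 'D'] : List Char) := by
        simp only [List.mem_cons, List.not_mem_nil, or_false]
        tauto
      rw [if_neg hm, ih, if_neg h]
      congr 1
      rw [List.map_map]
      apply List.map_congr_left
      intro k _
      simp only [Function.comp_apply]
      push_cast
      ring

lemma getD_map_natCast (ks : List Nat) : ∀ (j : Nat),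
    (ks.map (fun (k : Nat) => (k : Int))).getD j 0 = ((ks.getD j 0 : Nat) : Int) := by
  induction ks with
  | nil => intro j; simp
  | cons k ks ih =>
    intro j
    cases j with
    | zero => simp
    | succ j => simpa using ih j

lemma rangeMap_sliceChunks (cs : List Char) : ∀ (ks : List Nat),
    (List.range ks.length).map (fun (j : Nat) =>
      if (j : Int) < (ks.length : Int) - 1 then
        String.ofList ((cs.drop (ks.getD j 0)).take (ks.getD (j + 1) 0 - ks.getD j 0))
      else
        String.ofList (cs.drop (ks.getD j 0)))
    = sliceChunks cs ks := by
  intro ks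
  induction ks with
  | nil => rfl
  | cons i rest ih =>
    rw [List.length_cons, List.range_succ_eq_map]
    simp only [List.map_cons, List.map_map]
    cases rest with
    | nil =>
      simp [sliceChunks]
    | cons j rest' =>
      rw [sliceChunks, ← ih]
      congr 1
      · split_ifs with h
        · simp
        · exfalso
          push_cast [List.length_cons] at h
          omega
      · apply List.map_congr_left
        intro k hk
        simp only [Function.comp_apply, Nat.succ_eq_add_one, List.getD_cons_succ,
          List.length_cons]
        split_ifs with h1 h2 h2
        · rfl
        · exfalso; push_cast [List.length_cons] at h1 h2; omega
        · exfalso; push_cast [List.length_cons] at h1 h2; omega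
        · rfl

lemma sliceChunks_shift (cs : List Char) (c : Char) : ∀ (ks : List Nat),
    sliceChunks (c :: cs) (ks.map (· + 1)) = sliceChunks cs ks := by
  intro ks
  induction ks with
  | nil => simp [sliceChunks]
  | cons i rest ih =>
    cases rest with
    | nil => simp [sliceChunks]
    | cons j rest' =>
      simp only [List.map_cons] at *
      have hd : ((c :: cs).drop (i + 1)).take ((j + 1) - (i + 1)) = (cs.drop i).take (j - i) := by
        rw [List.drop_succ_cons]
        congr 1
        omega
      rw [sliceChunks, sliceChunks, ih, hd]

lemma segsIn_eq (cs : List Char) : ∀ (cur : List Char),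
    segsIn cur cs =
      match markerIdx cs with
      | [] => [String.ofList (cur ++ cs)]
      | j :: rest => String.ofList (cur ++ cs.take j) :: sliceChunks cs (j :: rest) := by
  induction cs with
  | nil => intro cur; simp [segsIn, markerIdx]
  | cons c cs ih =>
    intro cur
    by_cases h : c = 'L' ∨ c = 'S' ∨ c = 'D'
    · rw [segsIn, if_pos h, markerIdx, if_pos h]
      simp only [List.take_zero, List.append_nil]
      congr 1
      rw [ih [c]]
      cases hks : markerIdx cs with
      | nil =>
        simp [sliceChunks]
      | cons j rest =>
        simp only [List.map_cons]
        rw [sliceChunks]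
        have := sliceChunks_shift cs c (j :: rest)
        simp only [List.map_cons] at this
        rw [this]
        simp
    · rw [segsIn, if_neg h, markerIdx, if_neg h, ih (cur ++ [c])]
      cases hks : markerIdx cs with
      | nil => simp
      | cons j rest =>
        simp only [List.map_cons]
        have := sliceChunks_shift cs c (j :: rest)
        simp only [List.map_cons] at this
        rw [this]
        simp [List.take_succ_cons, List.append_assoc]

lemma segs_eq_sliceChunks (cs : List Char) :
    segs cs = sliceChunks cs (markerIdx cs) := by
  induction cs with
  | nil => simp [segs, markerIdx, sliceChunks]
  | cons c cs ih =>
    by_cases h : c = 'L' ∨ c = 'S' ∨ c = 'D'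
    · rw [segs, if_pos h, markerIdx, if_pos h, segsIn_eq]
      cases hks : markerIdx cs with
      | nil => simp [sliceChunks]
      | cons j rest =>
        simp only [List.map_cons]
        rw [sliceChunks]
        have := sliceChunks_shift cs c (j :: rest)
        simp only [List.map_cons] at this
        rw [this]
        simp
    · rw [segs, if_neg h, markerIdx, if_neg h, ih, sliceChunks_shift]

-- B's fold with any starting state produces the flushed prefix plus segs/segsIn of the rest
lemma altFold (cs : List Char) : ∀ (acc : List String) (cur? : Option (List Char)),
    (let fin := cs.foldl
        (fun (st : List String × Option (List Char)) ch =>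
          if ch = 'L' ∨ ch = 'S' ∨ ch = 'D' then
            (match st.2 with
             | none => st.1
             | some cur => st.1 ++ [String.ofList cur], some [ch])
          else
            match st.2 with
            | none => st
            | some cur => (st.1, some (cur ++ [ch])))
        (acc, cur?)
     match fin.2 with
     | none => fin.1
     | some cur => fin.1 ++ [String.ofList cur])
    = acc ++ (match cur? with | none => segs cs | some cur => segsIn cur cs) := by
  induction cs with
  | nil =>
    intro acc cur?
    cases cur? <;> simp [segs, segsIn]
  | cons c cs ih =>
    intro acc cur?
    simp only [List.foldl_cons]
    by_cases h : c = 'L' ∨ c = 'S' ∨ c = 'D'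
    · rw [if_pos h]
      cases cur? with
      | none =>
        rw [ih acc (some [c])]
        simp [segs, if_pos h]
      | some cur =>
        rw [ih (acc ++ [String.ofList cur]) (some [c])]
        simp [segsIn, if_pos h]
    · rw [if_neg h]
      cases cur? with
      | none =>
        rw [ih acc none]
        simp [segs, if_neg h]
      | some cur =>
        rw [ih acc (some (cur ++ [c]))]
        simp [segsIn, if_neg h]

lemma alt_eq_segs (s : String) : identify_small_pattern_alt s = segs s.toList := by
  unfold identify_small_pattern_alt
  have := altFold s.toList [] none
  simpa using this

lemma a_eq_sliceChunks (s : String) :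
    identify_small_pattern s = sliceChunks s.toList (markerIdx s.toList) := by
  unfold identify_small_pattern
  simp only []
  rw [idxFold s.toList [] 0]
  simp only [List.nil_append]
  set ks := markerIdx s.toList with hks
  set indexes : List Int := ks.map (fun (k : Nat) => ((0 : Int) + (k : Int))) with hidx
  have hidx' : indexes = ks.map (fun (k : Nat) => (k : Int)) := by
    rw [hidx]; apply List.map_congr_left; intro k _; ring
  have hfun : (fun (pats : List String) (i : Int) =>
      if i < (indexes.length : Int) - 1 then
        pats ++ [String.ofList (PySem.List.slice s.toList
          (some (PySem.List.pyGetD indexes i 0)) (some (PySem.List.pyGetD indexes (i + 1) 0)))]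
      else
        pats ++ [String.ofList (PySem.List.slice s.toList
          (some (PySem.List.pyGetD indexes i 0)) none)])
    = (fun (pats : List String) (i : Int) => pats ++
        [if i < (indexes.length : Int) - 1 then
          String.ofList (PySem.List.slice s.toList
            (some (PySem.List.pyGetD indexes i 0)) (some (PySem.List.pyGetD indexes (i + 1) 0)))
        else
          String.ofList (PySem.List.slice s.toList
            (some (PySem.List.pyGetD indexes i 0)) none)]) := by
    funext pats i
    split_ifs <;> rfl
  rw [hfun, PySem.List.foldl_append_singleton_eq_map]
  simp only [List.nil_append]
  rw [PySem.List.pyRange_one]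
  simp only [Int.sub_zero, Int.toNat_natCast, List.map_map]
  have hlen : indexes.length = ks.length := by rw [hidx']; simp
  rw [hlen]
  rw [← rangeMap_sliceChunks s.toList ks]
  apply List.map_congr_left
  intro j hj
  simp only [Function.comp, Int.zero_add]
  have hg : ∀ (m : Nat), PySem.List.pyGetD indexes ((m : Nat) : Int) 0 = ((ks.getD m 0 : Nat) : Int) := by
    intro m
    rw [hidx']
    rw [PySem.List.pyGetD_natCast]
    exact getD_map_natCast ks m
  rw [hlen] at *
  by_cases hc : ((j : Nat) : Int) < (ks.length : Int) - 1
  · rw [if_pos hc, if_pos hc]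
    have h1 := hg j
    have h2 := hg (j + 1)
    rw [h1, show ((j : Nat) : Int) + 1 = (((j + 1 : Nat) : Nat) : Int) by push_cast; ring, h2]
    rw [PySem.List.slice_natCast]
  · rw [if_neg hc, if_neg hc]
    rw [hg j, PySem.List.slice_from_natCast]

-- ===== VERDICT (by name: the statement is the Claim_ definition above) =====
theorem identify_small_pattern_spec : Claim_equal_identify_small_pattern := by
  intro s _
  unfold Spec_identify_small_pattern
  rw [alt_eq_segs, a_eq_sliceChunks, segs_eq_sliceChunks]
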